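-- pv_equiv track=rewrite | github.com/sbremner/jsObfuscate | jsObfuscate.py | get_nonalphanumeric
-- ===== SOURCE A (Python) =====
-- def get_nonalphanumeric(val):
--     zero = '+[]'
--     one = '+!+[]'
--
--     (d,r) = divmod(val, 10)
--
--     if d > 0:
--         return '{0}+[{1}]'.format(get_nonalphanumeric(d), get_nonalphanumeric(r))
--     else:
--         if r == 0:
--             return zero
--         else:
--             return '+[{0}]'.format((one * r))
-- ===== SOURCE B (Python) =====
-- def get_nonalphanumeric(val):
--     one = '+!+[]'
--
--     def encode(dg):
--         return '+[]' if dg == 0 else '+[' + one * dg + ']'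
--
--     suffix = ''
--     (d, r) = divmod(val, 10)
--     while d > 0:
--         suffix = '+[' + encode(r) + ']' + suffix
--         (d, r) = divmod(d, 10)
--     return encode(r) + suffix
-- ===== Notes on version B (the rewrite author's own statement) =====
-- stated objective: simpler
-- what changed: Replaced A's value-composing recursion by an iterative digit-peeling while-loop with a suffix accumulator and a single encode(digit) helper.
import Mathlib
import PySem

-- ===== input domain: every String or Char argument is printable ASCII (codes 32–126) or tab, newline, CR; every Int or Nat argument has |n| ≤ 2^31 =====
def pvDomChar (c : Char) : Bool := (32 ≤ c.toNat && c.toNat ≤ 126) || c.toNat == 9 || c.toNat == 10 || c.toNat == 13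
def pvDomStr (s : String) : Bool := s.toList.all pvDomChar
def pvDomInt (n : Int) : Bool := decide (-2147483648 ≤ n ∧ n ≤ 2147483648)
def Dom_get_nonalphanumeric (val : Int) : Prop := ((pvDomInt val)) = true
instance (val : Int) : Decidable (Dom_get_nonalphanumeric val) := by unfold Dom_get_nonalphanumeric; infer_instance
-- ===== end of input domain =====

-- B replaces A's value-composing recursion by an iterative digit-peeling loop with a suffix accumulator (objective: simpler decomposition, same cost).

-- str * n (Python string repetition), shared by both ports
def strRepeat (s : String) (n : Int) : String := String.ofList (PySem.List.pyRepeat s.toList n)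

-- ===== PORT A =====
def get_nonalphanumeric (val : Int) : String :=
  let d := PySem.Int.floordiv val 10
  let r := PySem.Int.mod val 10
  if h : d > 0 then
    get_nonalphanumeric d ++ "+[" ++ get_nonalphanumeric r ++ "]"
  else
    if r = 0 then "+[]"
    else "+[" ++ strRepeat "+!+[]" r ++ "]"
termination_by val.toNat
decreasing_by
  · have hd : PySem.Int.floordiv val 10 = val / 10 := PySem.Int.floordiv_eq_ediv_of_pos (by omega)
    replace h : PySem.Int.floordiv val 10 > 0 := h
    rw [hd] at h ⊢; omega
  · have hd : PySem.Int.floordiv val 10 = val / 10 := PySem.Int.floordiv_eq_ediv_of_pos (by omega)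
    have hr : PySem.Int.mod val 10 = val % 10 := PySem.Int.mod_eq_emod_of_pos (by omega)
    replace h : PySem.Int.floordiv val 10 > 0 := h
    rw [hd] at h; rw [hr]; omega

-- ===== PORT B =====
def encodeDigit (dg : Int) : String :=
  if dg = 0 then "+[]" else "+[" ++ strRepeat "+!+[]" dg ++ "]"

def nanLoop (val : Int) (suffix : String) : String :=
  let d := PySem.Int.floordiv val 10
  let r := PySem.Int.mod val 10
  if h : d > 0 then
    nanLoop d ("+[" ++ encodeDigit r ++ "]" ++ suffix)
  else
    encodeDigit r ++ suffix
termination_by val.toNat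
decreasing_by
  have hd : PySem.Int.floordiv val 10 = val / 10 := PySem.Int.floordiv_eq_ediv_of_pos (by omega)
  replace h : PySem.Int.floordiv val 10 > 0 := h
  rw [hd] at h ⊢; omega

def get_nonalphanumeric_alt (val : Int) : String := nanLoop val ""

-- ===== PRECONDITION & SPEC =====
def Spec_get_nonalphanumeric (val : Int) (out : String) : Prop := out = get_nonalphanumeric_alt val
instance (val : Int) (out : String) : Decidable (Spec_get_nonalphanumeric val out) := by unfold Spec_get_nonalphanumeric; infer_instance

-- ===== CLAIM (what is proved, stated in full; the proofs are below) =====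
def Claim_equal_get_nonalphanumeric : Prop := ∀ (val : Int), Dom_get_nonalphanumeric val → Spec_get_nonalphanumeric val (get_nonalphanumeric val)

-- ===== LEMMAS AND PROOFS =====

-- A's base case (d ≤ 0) is exactly encodeDigit of val % 10
theorem getA_base (val : Int) (h : ¬ PySem.Int.floordiv val 10 > 0) :
    get_nonalphanumeric val = encodeDigit (PySem.Int.mod val 10) := by
  rw [get_nonalphanumeric]
  simp only [h, dite_false]
  rfl

-- loop invariant: the suffix accumulator trails A's recursive result
theorem nanLoop_eq (val : Int) (suffix : String) :
    nanLoop val suffix = get_nonalphanumeric val ++ suffix := by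
  rw [nanLoop, get_nonalphanumeric]
  by_cases h : PySem.Int.floordiv val 10 > 0
  · rw [dif_pos h, dif_pos h]
    have IH := nanLoop_eq (PySem.Int.floordiv val 10)
      ("+[" ++ encodeDigit (PySem.Int.mod val 10) ++ "]" ++ suffix)
    rw [IH]
    have h1 : PySem.Int.mod val 10 = val % 10 := PySem.Int.mod_eq_emod_of_pos (by omega)
    have hfd : ¬ PySem.Int.floordiv (PySem.Int.mod val 10) 10 > 0 := by
      have h2 : PySem.Int.floordiv (PySem.Int.mod val 10) 10 = PySem.Int.mod val 10 / 10 :=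
        PySem.Int.floordiv_eq_ediv_of_pos (by omega)
      rw [h2, h1]; omega
    have hr := getA_base (PySem.Int.mod val 10) hfd
    have hmod : PySem.Int.mod (PySem.Int.mod val 10) 10 = PySem.Int.mod val 10 := by
      have h2 : PySem.Int.mod (val % 10) 10 = val % 10 % 10 :=
        PySem.Int.mod_eq_emod_of_pos (by omega)
      rw [h1, h2]; omega
    rw [hmod] at hr
    rw [hr]
    apply String.ext
    simp [String.toList_append, List.append_assoc]
  · rw [dif_neg h, dif_neg h]
    unfold encodeDigit
    split <;> rfl
termination_by val.toNat
decreasing_by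
  have hd : PySem.Int.floordiv val 10 = val / 10 := PySem.Int.floordiv_eq_ediv_of_pos (by omega)
  replace h : PySem.Int.floordiv val 10 > 0 := h
  rw [hd] at h ⊢; omega

-- ===== VERDICT (by name: the statement is the Claim_ definition above) =====
theorem get_nonalphanumeric_spec : Claim_equal_get_nonalphanumeric := by
  intro val _
  unfold Spec_get_nonalphanumeric get_nonalphanumeric_alt
  rw [nanLoop_eq]
  apply String.ext
  simp
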